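-- pv_equiv track=rewrite | github.com/maesierra/adventOfCode2023 | day13/day13.py | find_reflection_with_smudge
-- ===== SOURCE A (Python) =====
-- def is_power_of_two(n):
--     return (n & (n-1) == 0) and n != 0
--
-- def is_equal_or_smudge(line1, line2):
--     return (line1 == line2, is_power_of_two(line1 ^ line2))
--
-- def find_reflection_with_smudge(lines):
--     n_lines = len(lines)
--     for i in range(0, n_lines - 1):
--         is_equal,is_smudge = is_equal_or_smudge(lines[i], lines[i + 1])
--         n_smudges = 1 if is_smudge else 0
--         if is_equal or is_smudge:
--             i1 = i - 1
--             i2 = i + 2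
--             matching = True
--             while i1 >= 0 and i2 < n_lines and matching:
--                 is_equal,is_smudge = is_equal_or_smudge(lines[i1], lines[i2])
--                 n_smudges += 1 if is_smudge else 0
--                 matching = (is_equal or is_smudge) and n_smudges <= 1
--                 i1 = i1 - 1
--                 i2 = i2 + 1
--             if matching and n_smudges == 1:
--                 return i + 1
-- ===== SOURCE B (Python) =====
-- def find_reflection_with_smudge(lines):
--     # Anti-diagonal bucketing: every mirrored pair (p, q) for axis i satisfies
--     # p + q = 2*i + 1, so one pass over all odd-sum pairs accumulates, per axis,
--     # the total smudge distance; the axis whose bucket totals exactly 1 wins.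
--     n = len(lines)
--     totals = [0] * (n - 1)
--     for p in range(n):
--         for q in range(p + 1, n):
--             s = p + q
--             if s % 2 == 1:
--                 x = lines[p] ^ lines[q]
--                 if x:
--                     totals[(s - 1) // 2] += 1 if x > 0 and x & (x - 1) == 0 else 2
--     for i, t in enumerate(totals):
--         if t == 1:
--             return i + 1
-- ===== Notes on version B (the rewrite author's own statement) =====
-- stated objective: alternative
-- what changed: Instead of testing each candidate axis by expanding two pointers outward with a smudge budget and early exits, B makes a single pass over all odd-index-sum pairs, accumulating each pair's smudge distance into a per-axis bucket table indexed by the anti-diagonal (p+q-1)//2, then scans the table for the first axis whose total is exactly 1.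
import Mathlib
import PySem

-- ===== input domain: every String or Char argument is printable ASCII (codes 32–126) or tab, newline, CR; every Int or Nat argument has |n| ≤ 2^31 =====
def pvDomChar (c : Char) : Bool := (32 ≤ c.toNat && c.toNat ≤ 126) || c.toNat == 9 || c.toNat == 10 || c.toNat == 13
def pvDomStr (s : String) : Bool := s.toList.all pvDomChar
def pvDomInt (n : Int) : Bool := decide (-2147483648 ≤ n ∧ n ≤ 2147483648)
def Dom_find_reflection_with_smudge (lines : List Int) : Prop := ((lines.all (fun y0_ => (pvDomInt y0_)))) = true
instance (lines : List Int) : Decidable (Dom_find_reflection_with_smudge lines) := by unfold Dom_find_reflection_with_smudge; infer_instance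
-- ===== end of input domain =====

-- B replaces A's per-axis two-pointer expansion with smudge budget by a single pass over all
-- odd-index-sum pairs that accumulates smudge distances into a per-axis bucket table indexed by
-- the anti-diagonal (p+q-1)//2, then a scan of the table (objective: alternative algorithm).

-- ===== PORT A =====
def pvIsPowerOfTwo (n : Int) : Bool :=
  (PySem.Int.band n (n - 1) == 0) && !(n == 0)

def pvIsEqualOrSmudge (line1 line2 : Int) : Bool × Bool :=
  (line1 == line2, pvIsPowerOfTwo (PySem.Int.bxor line1 line2))

-- the while loop of A; the guard guarantees 0 ≤ i1 and i2 < len, and i1 < len, 0 ≤ i2 hold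
-- in every call reached from A, so pyGetD with default 0 is exactly Python's lines[i1]/lines[i2]
def pvAWhile (lines : List Int) (nLines i1 i2 : Int) (matching : Bool) (nSmudges : Int) :
    Bool × Int :=
  if h : 0 ≤ i1 ∧ i2 < nLines ∧ matching = true then
    let p := pvIsEqualOrSmudge (PySem.List.pyGetD lines i1 0) (PySem.List.pyGetD lines i2 0)
    let nSmudges' := nSmudges + (if p.2 then 1 else 0)
    pvAWhile lines nLines (i1 - 1) (i2 + 1) ((p.1 || p.2) && decide (nSmudges' ≤ 1)) nSmudges'
  else (matching, nSmudges)
termination_by (i1 + 1).toNat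
decreasing_by omega

-- the for loop of A over range(0, n_lines - 1), with early return
def pvAScan (lines : List Int) (nLines : Int) : List Int → Option Int
  | [] => none
  | i :: rest =>
    let p := pvIsEqualOrSmudge (PySem.List.pyGetD lines i 0) (PySem.List.pyGetD lines (i + 1) 0)
    let nSmudges : Int := if p.2 then 1 else 0
    if p.1 || p.2 then
      let r := pvAWhile lines nLines (i - 1) (i + 2) true nSmudges
      if r.1 && r.2 == 1 then some (i + 1) else pvAScan lines nLines rest
    else pvAScan lines nLines rest

def find_reflection_with_smudge (lines : List Int) : Option Int :=
  pvAScan lines (lines.length : Int)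
    (PySem.List.pyRange 0 ((lines.length : Int) - 1) 1)

-- ===== PORT B =====
-- body of B's inner q-loop; for every executed update 0 ≤ p < q < n and p+q odd, so the
-- bucket index (p+q-1)//2 lies in [0, n-2] ⊂ range of totals: pySetD/pyGetD are exactly
-- Python's totals[idx] += … there
def pvBStep (lines : List Int) (p : Int) (t : List Int) (q : Int) : List Int :=
  let s := p + q
  if PySem.Int.mod s 2 = 1 then
    let x := PySem.Int.bxor (PySem.List.pyGetD lines p 0) (PySem.List.pyGetD lines q 0)
    if x ≠ 0 then
      let idx := PySem.Int.floordiv (s - 1) 2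
      PySem.List.pySetD t idx
        (PySem.List.pyGetD t idx 0 + (if 0 < x ∧ PySem.Int.band x (x - 1) = 0 then 1 else 2))
    else t
  else t

def pvBInner (lines : List Int) (n p : Int) (totals : List Int) : List Int :=
  (PySem.List.pyRange (p + 1) n 1).foldl (pvBStep lines p) totals

-- totals = [0] * (n - 1)  (empty for n ≤ 1, exactly Python's negative list repeat)
def pvBTotals (lines : List Int) : List Int :=
  (PySem.List.pyRange 0 (lines.length : Int) 1).foldl
    (fun t p => pvBInner lines (lines.length : Int) p t)
    (List.replicate ((lines.length : Int) - 1).toNat 0)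

-- for i, t in enumerate(totals): if t == 1: return i + 1
def pvBFind : List Int → Int → Option Int
  | [], _ => none
  | t :: rest, i => if t == 1 then some (i + 1) else pvBFind rest (i + 1)

def find_reflection_with_smudge_alt (lines : List Int) : Option Int :=
  pvBFind (pvBTotals lines) 0

-- ===== PRECONDITION & SPEC =====
def Spec_find_reflection_with_smudge (lines : List Int) (out : Option Int) : Prop := out = find_reflection_with_smudge_alt lines
instance (lines : List Int) (out : Option Int) : Decidable (Spec_find_reflection_with_smudge lines out) := by unfold Spec_find_reflection_with_smudge; infer_instance

-- ===== CLAIM (what is proved, stated in full; the proofs are below) =====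
def Claim_equal_find_reflection_with_smudge : Prop := ∀ (lines : List Int), Dom_find_reflection_with_smudge lines → Spec_find_reflection_with_smudge lines (find_reflection_with_smudge lines)

-- ===== LEMMAS AND PROOFS =====

-- smudge distance of a single pair: 0 = equal, 1 = one-bit difference, 2 = more
def pvCost (a b : Int) : Int :=
  if PySem.Int.bxor a b = 0 then 0
  else if 0 < PySem.Int.bxor a b ∧
      PySem.Int.band (PySem.Int.bxor a b) (PySem.Int.bxor a b - 1) = 0 then 1 else 2

-- total smudge distance of the mirrored pairs (k-1, j), (k-2, j+1), … while both sides exist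
def pvMSum (lines : List Int) : Nat → Nat → Int
  | 0, _ => 0
  | k + 1, j =>
    if j < lines.length then
      pvCost (lines.getD k 0) (lines.getD j 0) + pvMSum lines k (j + 1)
    else 0

-- first i in the list with total mirrored smudge distance exactly 1
def pvIdx (lines : List Int) : List Int → Option Int
  | [] => none
  | i :: rest =>
    if pvMSum lines (i.toNat + 1) (i.toNat + 1) == 1 then some (i + 1) else pvIdx lines rest

theorem pv_bxor_eq_zero_iff (a b : Int) : PySem.Int.bxor a b = 0 ↔ a = b := by
  constructor
  · intro h
    unfold PySem.Int.bxor at h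
    split_ifs at h with h1 h2 h2 <;> [skip; omega; omega; skip]
    · have := Nat.eq_of_xor_eq_zero (by exact_mod_cast h)
      omega
    · have := Nat.eq_of_xor_eq_zero (by exact_mod_cast h)
      omega
  · rintro rfl; exact PySem.Int.bxor_self a

theorem pv_band_neg_neg (a b : Int) (ha : a < 0) (hb : b < 0) : PySem.Int.band a b < 0 := by
  unfold PySem.Int.band
  rw [if_neg (by omega), if_neg (by omega)]
  have := Int.natCast_nonneg ((-a - 1).toNat ||| (-b - 1).toNat)
  omega

theorem pvCost_values (a b : Int) : pvCost a b = 0 ∨ pvCost a b = 1 ∨ pvCost a b = 2 := by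
  unfold pvCost; split_ifs <;> simp

theorem pvCost_nonneg (a b : Int) : 0 ≤ pvCost a b := by
  rcases pvCost_values a b with h | h | h <;> omega

theorem pvMSum_nonneg (lines : List Int) (k j : Nat) : 0 ≤ pvMSum lines k j := by
  induction k generalizing j with
  | zero => simp [pvMSum]
  | succ m ih =>
    simp only [pvMSum]
    split_ifs with h
    · have := pvCost_nonneg (lines.getD m 0) (lines.getD j 0); have := ih (j + 1); omega
    · omega

theorem pvMSum_of_ge (lines : List Int) (k j : Nat) (h : lines.length ≤ j) :
    pvMSum lines k j = 0 := by
  cases k <;> simp [pvMSum, Nat.not_lt.mpr h]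

theorem pvCost_eq_zero (a b : Int) : (a == b) = (pvCost a b == 0) := by
  unfold pvCost
  by_cases h : a = b
  · rw [(pv_bxor_eq_zero_iff a b).mpr h]; simp [h]
  · rw [if_neg (fun hx => h ((pv_bxor_eq_zero_iff a b).mp hx))]
    split_ifs <;> simp [h]

theorem pvPow_eq_one (a b : Int) :
    pvIsPowerOfTwo (PySem.Int.bxor a b) = (pvCost a b == 1) := by
  unfold pvIsPowerOfTwo pvCost
  by_cases h0 : PySem.Int.bxor a b = 0
  · simp [h0]
  · rw [if_neg h0]
    by_cases hb : PySem.Int.band (PySem.Int.bxor a b) (PySem.Int.bxor a b - 1) = 0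
    · have hpos : 0 < PySem.Int.bxor a b := by
        rcases lt_trichotomy (PySem.Int.bxor a b) 0 with h | h | h
        · exact absurd hb (by have := pv_band_neg_neg (PySem.Int.bxor a b) (PySem.Int.bxor a b - 1) h (by omega); omega)
        · exact absurd h h0
        · exact h
      simp [hb, h0, hpos]
    · simp [hb]

theorem pvAWhile_stop (lines : List Int) (n i1 i2 : Int) (s : Int) :
    pvAWhile lines n i1 i2 false s = (false, s) := by
  rw [pvAWhile]; simp

-- A's while loop starting at mirrored indices (k-1, j) with s smudges found so far accepts
-- exactly when s plus the total smudge distance of the remaining mirrored pairs is one.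
theorem pvWhile_eq (lines : List Int) : ∀ (k j : Nat) (s : Int), k ≤ lines.length → 0 ≤ s → s ≤ 1 →
    ((pvAWhile lines (lines.length : Int) ((k : Int) - 1) (j : Int) true s).1 &&
      ((pvAWhile lines (lines.length : Int) ((k : Int) - 1) (j : Int) true s).2 == 1))
    = (s + pvMSum lines k j == 1) := by
  intro k
  induction k with
  | zero =>
    intro j s _ _ _
    rw [pvAWhile, dif_neg (by omega)]
    simp [pvMSum]
  | succ m ih =>
    intro j s hk hs0 hs1
    by_cases hj : j < lines.length
    · have hg1 : PySem.List.pyGetD lines (((m + 1 : Nat) : Int) - 1) 0 = lines.getD m 0 := by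
        rw [show ((m + 1 : Nat) : Int) - 1 = ((m : Nat) : Int) from by push_cast; ring,
          PySem.List.pyGetD_natCast]
      have hg2 : PySem.List.pyGetD lines ((j : Nat) : Int) 0 = lines.getD j 0 := by
        rw [PySem.List.pyGetD_natCast]
      have harw : (((m + 1 : Nat) : Int) - 1 - 1) = ((m : Nat) : Int) - 1 := by push_cast; ring
      have harw2 : ((j : Nat) : Int) + 1 = ((j + 1 : Nat) : Int) := by push_cast; ring
      rw [pvAWhile, dif_pos ⟨by omega, by exact_mod_cast hj, rfl⟩]
      simp only [pvIsEqualOrSmudge, hg1, hg2]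
      rw [pvCost_eq_zero (lines.getD m 0) (lines.getD j 0),
        pvPow_eq_one (lines.getD m 0) (lines.getD j 0)]
      rw [harw, harw2]
      simp only [pvMSum, if_pos hj]
      rcases pvCost_values (lines.getD m 0) (lines.getD j 0) with hc | hc | hc
      · -- equal pair: cost 0, smudge count unchanged
        rw [hc]
        have e3 : decide (s ≤ (1:Int)) = true := by simp [hs1]
        simp only [show ((0:Int) == 0) = true from rfl, show ((0:Int) == 1) = false from rfl,
          Bool.true_or, if_false, Bool.false_eq_true, add_zero, e3, Bool.and_true, Bool.true_and]
        rw [ih (j + 1) s (by omega) hs0 hs1]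
        rw [show s + (0 + pvMSum lines m (j + 1)) = s + pvMSum lines m (j + 1) from by ring]
      · -- smudge pair: cost 1
        rw [hc]
        simp only [show ((1:Int) == 0) = false from rfl, show ((1:Int) == 1) = true from rfl,
          Bool.or_true, if_true, Bool.false_eq_true, Bool.true_and]
        by_cases hs' : s + 1 ≤ 1
        · have e3 : decide (s + 1 ≤ (1:Int)) = true := by simp [hs']
          simp only [e3, Bool.and_true]
          rw [ih (j + 1) (s + 1) (by omega) (by omega) (by omega)]
          rw [show s + 1 + pvMSum lines m (j + 1) = s + (1 + pvMSum lines m (j + 1)) from by ring]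
        · have e3 : decide (s + 1 ≤ (1:Int)) = false := by simp; omega
          simp only [e3, Bool.and_false, pvAWhile_stop, Bool.false_and]
          have hnn := pvMSum_nonneg lines m (j + 1)
          rw [show (s + (1 + pvMSum lines m (j + 1)) == 1) = false from by
            rw [beq_eq_false_iff_ne]; omega]
      · -- mismatching pair: cost 2, A stops unmatched, total ≥ 2
        rw [hc]
        simp only [show ((2:Int) == 0) = false from rfl, show ((2:Int) == 1) = false from rfl,
          Bool.or_false, if_false, Bool.false_eq_true, Bool.false_and, Bool.and_false,
          pvAWhile_stop]
        have hnn := pvMSum_nonneg lines m (j + 1)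
        rw [show (s + (2 + pvMSum lines m (j + 1)) == 1) = false from by
          rw [beq_eq_false_iff_ne]; omega]
    · -- the right half is exhausted: guard fails, no pairs remain
      rw [pvAWhile,
        dif_neg (by push_neg; intro _ h; exact absurd (by exact_mod_cast h) (by omega))]
      rw [pvMSum, if_neg hj]
      simp

-- A's outer loop returns the first admissible i whose total mirrored smudge distance is one
theorem pvAScan_eq_pvIdx (lines : List Int) : ∀ (R : List Int),
    (∀ i ∈ R, 0 ≤ i ∧ i < (lines.length : Int) - 1) →
    pvAScan lines (lines.length : Int) R = pvIdx lines R := by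
  intro R
  induction R with
  | nil => intro _; rfl
  | cons i rest ih =>
    intro hR
    obtain ⟨hi0, hilt⟩ := hR i (by simp)
    have ihr := ih (fun j hj => hR j (by simp [hj]))
    obtain ⟨m, rfl⟩ : ∃ m : Nat, i = (m : Int) := ⟨i.toNat, (Int.toNat_of_nonneg hi0).symm⟩
    have hm1 : m + 1 < lines.length := by omega
    have hg1 : PySem.List.pyGetD lines ((m : Nat) : Int) 0 = lines.getD m 0 :=
      PySem.List.pyGetD_natCast lines m 0
    have hg2 : PySem.List.pyGetD lines (((m : Nat) : Int) + 1) 0 = lines.getD (m + 1) 0 := by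
      rw [show ((m : Nat) : Int) + 1 = ((m + 1 : Nat) : Int) from by push_cast; ring,
        PySem.List.pyGetD_natCast]
    have harw2 : ((m : Nat) : Int) + 2 = ((m + 2 : Nat) : Int) := by push_cast; ring
    simp only [pvAScan, pvIdx, pvIsEqualOrSmudge, hg1, hg2, Int.toNat_natCast]
    rw [pvCost_eq_zero (lines.getD m 0) (lines.getD (m + 1) 0),
      pvPow_eq_one (lines.getD m 0) (lines.getD (m + 1) 0)]
    have hM : pvMSum lines (m + 1) (m + 1)
        = pvCost (lines.getD m 0) (lines.getD (m + 1) 0) + pvMSum lines m (m + 2) := by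
      simp [pvMSum, hm1]
    rcases pvCost_values (lines.getD m 0) (lines.getD (m + 1) 0) with hc | hc | hc
    · -- equal first pair, no smudge yet
      rw [hc] at hM ⊢
      simp only [show ((0:Int) == 0) = true from rfl, show ((0:Int) == 1) = false from rfl,
        Bool.true_or, if_true, Bool.false_eq_true, if_false]
      rw [harw2, pvWhile_eq lines m (m + 2) 0 (by omega) (by omega) (by omega)]
      have hcond : (pvMSum lines (m + 1) (m + 1) == 1) = (0 + pvMSum lines m (m + 2) == 1) := by
        rw [hM]
      simp only [hcond]
      split_ifs with h
      · rfl
      · exact ihr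
    · -- smudged first pair, one smudge in the budget
      rw [hc] at hM ⊢
      simp only [show ((1:Int) == 0) = false from rfl, show ((1:Int) == 1) = true from rfl,
        Bool.or_true, if_true]
      rw [harw2, pvWhile_eq lines m (m + 2) 1 (by omega) (by omega) (by omega)]
      have hcond : (pvMSum lines (m + 1) (m + 1) == 1) = (1 + pvMSum lines m (m + 2) == 1) := by
        rw [hM]
      simp only [hcond]
      split_ifs with h
      · rfl
      · exact ihr
    · -- first pair differs in more than one bit: both sides skip this axis
      rw [hc] at hM ⊢
      simp only [show ((2:Int) == 0) = false from rfl, show ((2:Int) == 1) = false from rfl,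
        Bool.or_false, Bool.false_eq_true, if_false]
      have hnn := pvMSum_nonneg lines m (m + 2)
      have hfalse : (pvMSum lines (m + 1) (m + 1) == 1) = false := by
        rw [beq_eq_false_iff_ne]; omega
      simp only [Int.toNat_natCast, hfalse, Bool.false_eq_true, if_false]
      exact ihr

-- one step of B's inner loop adds, to bucket i, the cost of pair (p, q) iff q = 2i+1-p
theorem pvBStep_getD (lines : List Int) (p i : Nat) (a : Int) (t : List Int)
    (hpa : (p : Int) < a) (ha : a < (lines.length : Int))
    (ht : t.length = ((lines.length : Int) - 1).toNat) :
    (pvBStep lines (p : Int) t a).length = t.length ∧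
    (pvBStep lines (p : Int) t a).getD i 0
      = t.getD i 0 + (if a = 2 * (i : Int) + 1 - (p : Int)
            then pvCost (lines.getD p 0) (lines.getD a.toNat 0) else 0) := by
  have ha0 : 0 ≤ a := by omega
  have hgp : PySem.List.pyGetD lines ((p : Nat) : Int) 0 = lines.getD p 0 :=
    PySem.List.pyGetD_natCast lines p 0
  have hga : PySem.List.pyGetD lines a 0 = lines.getD a.toNat 0 :=
    PySem.List.pyGetD_of_nonneg lines 0 ha0
  have hmod : PySem.Int.mod ((p : Int) + a) 2 = ((p : Int) + a) % 2 :=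
    PySem.Int.mod_eq_emod_of_pos (by omega)
  simp only [pvBStep, hgp, hga, hmod]
  by_cases hodd : ((p : Int) + a) % 2 = 1
  · rw [if_pos hodd]
    by_cases hx : PySem.Int.bxor (lines.getD p 0) (lines.getD a.toNat 0) = 0
    · -- equal pair: Python performs no update, and the cost of this pair is 0
      rw [if_neg (fun h => h hx)]
      refine ⟨rfl, ?_⟩
      split_ifs with hq
      · unfold pvCost
        rw [if_pos hx, add_zero]
      · rw [add_zero]
    · rw [if_pos hx]
      have hfd : PySem.Int.floordiv ((p : Int) + a - 1) 2 = ((p : Int) + a - 1) / 2 :=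
        PySem.Int.floordiv_eq_ediv_of_pos (by omega)
      have hidx0 : 0 ≤ ((p : Int) + a - 1) / 2 := by omega
      have hidxlt : (((p : Int) + a - 1) / 2).toNat < t.length := by omega
      rw [hfd, PySem.List.pySetD_of_nonneg t _ hidx0,
        PySem.List.pyGetD_of_nonneg t 0 hidx0]
      refine ⟨List.length_set .., ?_⟩
      by_cases hqi : (((p : Int) + a - 1) / 2).toNat = i
      · -- the update hits bucket i: this is exactly the mirrored partner q = 2i+1-p
        have hq : a = 2 * (i : Int) + 1 - (p : Int) := by omega
        rw [hqi, List.getD_eq_getElem?_getD, List.getElem?_set_self (by omega)]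
        rw [if_pos hq]
        simp only [pvCost, if_neg hx, Option.getD_some]
      · have hq : ¬ a = 2 * (i : Int) + 1 - (p : Int) := by omega
        rw [List.getD_eq_getElem?_getD, List.getElem?_set_ne hqi,
          ← List.getD_eq_getElem?_getD, if_neg hq, add_zero]
  · -- even index sum: no axis has this pair mirrored, Python skips it
    rw [if_neg hodd]
    have hq : ¬ a = 2 * (i : Int) + 1 - (p : Int) := by omega
    exact ⟨rfl, by rw [if_neg hq, add_zero]⟩

-- B's inner loop from q = a on adds exactly the cost of the unique mirrored partner in range
theorem pvBFoldGo (lines : List Int) (p i : Nat) : ∀ (cnt : Nat) (a : Int) (t : List Int),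
    (p : Int) < a → ((lines.length : Int) - a).toNat = cnt →
    t.length = ((lines.length : Int) - 1).toNat →
    ((PySem.List.pyRange a (lines.length : Int) 1).foldl (pvBStep lines (p : Int)) t).length
        = t.length
    ∧ ((PySem.List.pyRange a (lines.length : Int) 1).foldl (pvBStep lines (p : Int)) t).getD i 0
      = t.getD i 0 + (if a ≤ 2 * (i : Int) + 1 - (p : Int)
            ∧ 2 * (i : Int) + 1 - (p : Int) < (lines.length : Int)
          then pvCost (lines.getD p 0) (lines.getD (2 * i + 1 - p) 0) else 0) := by
  intro cnt
  induction cnt with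
  | zero =>
    intro a t hpa hcnt ht
    rw [PySem.List.pyRange_one_eq_nil (by omega)]
    exact ⟨rfl, by rw [List.foldl_nil, if_neg (by omega), add_zero]⟩
  | succ c ihc =>
    intro a t hpa hcnt ht
    have hlt : a < (lines.length : Int) := by omega
    rw [PySem.List.pyRange_one_cons hlt]
    simp only [List.foldl_cons]
    obtain ⟨hL, hG⟩ := pvBStep_getD lines p i a t hpa hlt ht
    obtain ⟨hL2, hG2⟩ := ihc (a + 1) (pvBStep lines (p : Int) t a) (by omega) (by omega)
      (by rw [hL, ht])
    refine ⟨by rw [hL2, hL], ?_⟩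
    rw [hG2, hG]
    by_cases hq : a = 2 * (i : Int) + 1 - (p : Int)
    · have hnat : a.toNat = 2 * i + 1 - p := by omega
      rw [if_pos hq, if_neg (by omega), if_pos (by omega), hnat, add_zero]
    · have hiff : (a + 1 ≤ 2 * (i : Int) + 1 - (p : Int)
            ∧ 2 * (i : Int) + 1 - (p : Int) < (lines.length : Int))
          ↔ (a ≤ 2 * (i : Int) + 1 - (p : Int)
            ∧ 2 * (i : Int) + 1 - (p : Int) < (lines.length : Int)) := by omega
      rw [if_neg hq, add_zero, if_congr hiff rfl rfl]

-- contribution of outer index p to bucket i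
def pvPTerm (lines : List Int) (p i : Nat) : Int :=
  if p ≤ i ∧ 2 * i + 1 - p < lines.length then
    pvCost (lines.getD p 0) (lines.getD (2 * i + 1 - p) 0)
  else 0

-- B's outer loop from p = b on adds the contributions of all p ≥ b to bucket i
theorem pvBOuterGo (lines : List Int) (i : Nat) : ∀ (cnt : Nat) (b : Int) (t : List Int),
    0 ≤ b → ((lines.length : Int) - b).toNat = cnt →
    t.length = ((lines.length : Int) - 1).toNat →
    ((PySem.List.pyRange b (lines.length : Int) 1).foldl
        (fun t p => pvBInner lines (lines.length : Int) p t) t).length = t.length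
    ∧ ((PySem.List.pyRange b (lines.length : Int) 1).foldl
        (fun t p => pvBInner lines (lines.length : Int) p t) t).getD i 0
      = t.getD i 0 + ((PySem.List.pyRange b (lines.length : Int) 1).map
          (fun p => pvPTerm lines p.toNat i)).sum := by
  intro cnt
  induction cnt with
  | zero =>
    intro b t hb hcnt ht
    rw [PySem.List.pyRange_one_eq_nil (by omega)]
    exact ⟨rfl, by simp⟩
  | succ c ihc =>
    intro b t hb hcnt ht
    have hlt : b < (lines.length : Int) := by omega
    have hbe : ((b.toNat : Nat) : Int) = b := by omega
    rw [PySem.List.pyRange_one_cons hlt]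
    simp only [List.foldl_cons, List.map_cons, List.sum_cons]
    obtain ⟨hL, hG⟩ := pvBFoldGo lines b.toNat i
      ((lines.length : Int) - (((b.toNat : Nat) : Int) + 1)).toNat (((b.toNat : Nat) : Int) + 1)
      t (by omega) rfl ht
    have hInner : pvBInner lines (lines.length : Int) b t
        = (PySem.List.pyRange (((b.toNat : Nat) : Int) + 1) (lines.length : Int) 1).foldl
            (pvBStep lines ((b.toNat : Nat) : Int)) t := by
      unfold pvBInner; rw [hbe]
    have hterm : (if ((b.toNat : Nat) : Int) + 1 ≤ 2 * (i : Int) + 1 - ((b.toNat : Nat) : Int)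
          ∧ 2 * (i : Int) + 1 - ((b.toNat : Nat) : Int) < (lines.length : Int)
        then pvCost (lines.getD b.toNat 0) (lines.getD (2 * i + 1 - b.toNat) 0) else 0)
        = pvPTerm lines b.toNat i := by
      unfold pvPTerm
      exact if_congr (by omega) rfl rfl
    rw [hterm] at hG
    obtain ⟨hL2, hG2⟩ := ihc (b + 1) (pvBInner lines (lines.length : Int) b t) (by omega)
      (by omega) (by rw [hInner, hL, ht])
    refine ⟨by rw [hL2, hInner, hL], ?_⟩
    rw [hG2, hInner, hG]
    ring

-- sum of the bucket contributions is the mirrored smudge distance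
theorem pvPTerm_sum (lines : List Int) (i : Nat) : ∀ (m : Nat), m ≤ i + 1 →
    pvMSum lines m (2 * i + 2 - m) = ((List.range m).map (fun k => pvPTerm lines k i)).sum := by
  intro m
  induction m with
  | zero => intro _; simp [pvMSum]
  | succ k ihk =>
    intro hm
    have hk : k ≤ i := by omega
    rw [List.range_succ, List.map_append, List.sum_append, List.map_singleton,
      List.sum_singleton]
    rw [show 2 * i + 2 - (k + 1) = 2 * i + 1 - k from by omega]
    simp only [pvMSum]
    by_cases hlen : 2 * i + 1 - k < lines.length
    · rw [if_pos hlen, show 2 * i + 1 - k + 1 = 2 * i + 2 - k from by omega, ihk (by omega)]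
      unfold pvPTerm
      rw [if_pos ⟨hk, hlen⟩]
      ring
    · rw [if_neg hlen, ← ihk (by omega), pvMSum_of_ge lines k _ (by omega)]
      unfold pvPTerm
      rw [if_neg (by omega)]
      ring

theorem pvBTotals_spec (lines : List Int) :
    (pvBTotals lines).length = ((lines.length : Int) - 1).toNat ∧
    ∀ i : Nat, i < ((lines.length : Int) - 1).toNat →
      (pvBTotals lines).getD i 0 = pvMSum lines (i + 1) (i + 1) := by
  constructor
  · exact (pvBOuterGo lines 0 (lines.length : Nat) 0
      (List.replicate ((lines.length : Int) - 1).toNat 0) (by omega) (by omega)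
      (List.length_replicate ..)).1.trans (List.length_replicate ..)
  · intro i hi
    obtain ⟨hL, hG⟩ := pvBOuterGo lines i (lines.length : Nat) 0
      (List.replicate ((lines.length : Int) - 1).toNat 0) (by omega) (by omega)
      (List.length_replicate ..)
    unfold pvBTotals
    rw [hG, List.getD_eq_getElem?_getD, List.getElem?_replicate]
    rw [PySem.List.pyRange_zero_natCast, List.map_map]
    rw [show ((fun p => pvPTerm lines p.toNat i) ∘ (fun k : Nat => (k : Int)))
        = fun k => pvPTerm lines k i from funext fun k => by simp]
    have hi1 : i + 1 ≤ lines.length := by omega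
    rw [show lines.length = (i + 1) + (lines.length - (i + 1)) from by omega,
      List.range_add, List.map_append, List.sum_append, List.map_map]
    rw [List.sum_eq_zero (l := ((List.range (lines.length - (i + 1))).map
        ((fun k => pvPTerm lines k i) ∘ (fun j => (i + 1) + j)))) (by
      intro x hx
      rw [List.mem_map] at hx
      obtain ⟨j, _, rfl⟩ := hx
      simp only [Function.comp]
      unfold pvPTerm
      rw [if_neg (by omega)])]
    rw [← pvPTerm_sum lines i (i + 1) (le_refl _),
      show 2 * i + 2 - (i + 1) = i + 1 from by omega]
    split_ifs <;> simp

theorem pvBFind_eq (lines : List Int) : ∀ (T : List Int) (c : Nat),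
    (∀ k, k < T.length → T.getD k 0 = pvMSum lines (c + k + 1) (c + k + 1)) →
    pvBFind T (c : Int) = pvIdx lines (PySem.List.pyRange (c : Int) ((c : Int) + T.length) 1) := by
  intro T
  induction T with
  | nil =>
    intro c _
    rw [PySem.List.pyRange_one_eq_nil (by simp)]
    rfl
  | cons t rest ih =>
    intro c h
    rw [PySem.List.pyRange_one_cons (by simp only [List.length_cons]; push_cast; omega)]
    simp only [pvBFind, pvIdx, Int.toNat_natCast, List.length_cons]
    have h0 : t = pvMSum lines (c + 1) (c + 1) := by
      have := h 0 (by simp)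
      simpa using this
    have hcond : (t == 1) = (pvMSum lines (c + 1) (c + 1) == 1) := by rw [h0]
    simp only [hcond]
    split_ifs with hc
    · rfl
    · rw [show (c : Int) + 1 = ((c + 1 : Nat) : Int) from by push_cast; ring]
      rw [ih (c + 1) (fun k hk => by
        have := h (k + 1) (by simp only [List.length_cons]; omega)
        simpa [show c + (k + 1) + 1 = c + 1 + k + 1 from by omega] using this)]
      congr 2
      push_cast
      ring

-- ===== VERDICT (by name: the statement is the Claim_ definition above) =====
theorem find_reflection_with_smudge_spec : Claim_equal_find_reflection_with_smudge := by
  intro lines _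
  unfold Spec_find_reflection_with_smudge find_reflection_with_smudge
    find_reflection_with_smudge_alt
  obtain ⟨hLen, hGet⟩ := pvBTotals_spec lines
  rw [pvAScan_eq_pvIdx lines _ (fun i hi => by
    rw [PySem.List.mem_pyRange_one] at hi; omega)]
  rw [show (0 : Int) = ((0 : Nat) : Int) from rfl,
    pvBFind_eq lines (pvBTotals lines) 0 (fun k hk => by
      rw [hGet k (by omega)]; rw [Nat.zero_add])]
  congr 1
  rw [hLen]
  by_cases h : 1 ≤ lines.length
  · congr 1
    push_cast
    omega
  · rw [PySem.List.pyRange_one_eq_nil (by omega), PySem.List.pyRange_one_eq_nil (by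
      have : lines.length = 0 := by omega
      simp [this])]
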